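-- pv_equiv track=rewrite | github.com/ThetaSinner/PyWireDI | PyWireDI/caseTransform.py | underscore_to_pascal_case
-- ===== SOURCE A (Python) =====
-- def underscore_to_pascal_case(pascal_case):
--     result = ""
--     last_was_underscore = True
--     for letter in pascal_case:
--         if last_was_underscore and letter != '_':
--             result += letter.upper()
--             last_was_underscore = False
--         else:
--             if letter == '_':
--                 last_was_underscore = True
--             else:
--                 result += letter
--
--     if len(result) is not 0 and result[0].islower():
--         result = result[0].upper() + result[1:]
--
--     return result
-- ===== SOURCE B (Python) =====
-- def underscore_to_pascal_case(pascal_case):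
--     return ''.join((w[0].upper() + w[1:]) if w else ''
--                    for w in pascal_case.split('_'))
-- ===== Notes on version B (the rewrite author's own statement) =====
-- stated objective: idiomatic
-- what changed: Replaced A's per-character state machine (tracking last_was_underscore, plus a dead first-letter fixup) by split-on-underscore, capitalize each word's first character, and join.
import Mathlib
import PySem

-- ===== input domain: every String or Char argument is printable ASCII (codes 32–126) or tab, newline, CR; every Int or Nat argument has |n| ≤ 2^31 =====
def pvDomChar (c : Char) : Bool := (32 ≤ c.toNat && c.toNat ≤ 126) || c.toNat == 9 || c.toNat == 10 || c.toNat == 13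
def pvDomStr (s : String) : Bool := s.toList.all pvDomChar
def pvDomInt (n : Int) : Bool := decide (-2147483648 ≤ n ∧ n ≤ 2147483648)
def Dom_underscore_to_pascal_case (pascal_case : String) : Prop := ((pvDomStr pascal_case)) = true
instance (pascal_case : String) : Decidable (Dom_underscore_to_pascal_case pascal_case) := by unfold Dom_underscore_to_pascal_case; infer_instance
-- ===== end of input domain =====

-- B replaces A's per-character state machine by split-on-'_' + capitalize-each-word + join (idiomatic).

-- ===== PORT A =====
-- one loop step of A: state = (result so far, last_was_underscore)
def pvStepA (st : List Char × Bool) (letter : Char) : List Char × Bool :=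
  if st.2 ∧ letter ≠ '_' then (st.1 ++ [PySem.Chars.upperChar letter], false)
  else if letter = '_' then (st.1, true)
  else (st.1 ++ [letter], st.2)

def underscore_to_pascal_case (pascal_case : String) : String :=
  let st := pascal_case.toList.foldl pvStepA ([], true)
  let result := st.1
  -- `len(result) is not 0 and result[0].islower()` (the guard makes result[0] safe)
  let result :=
    if result.length ≠ 0 ∧ PySem.Chars.islower result.headI then
      PySem.Chars.upperChar result.headI :: result.tail
    else result
  String.mk result

-- ===== PORT B =====
-- `(w[0].upper() + w[1:]) if w else ''`
def pvCap (w : List Char) : List Char :=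
  match w with
  | [] => []
  | c :: rest => PySem.Chars.upperChar c :: rest

def underscore_to_pascal_case_alt (pascal_case : String) : String :=
  String.mk (PySem.Chars.join [] ((PySem.Chars.splitOn pascal_case.toList ['_']).map pvCap))

-- ===== PRECONDITION & SPEC =====
def Spec_underscore_to_pascal_case (pascal_case : String) (out : String) : Prop := out = underscore_to_pascal_case_alt pascal_case
instance (pascal_case : String) (out : String) : Decidable (Spec_underscore_to_pascal_case pascal_case out) := by unfold Spec_underscore_to_pascal_case; infer_instance

-- ===== CLAIM (what is proved, stated in full; the proofs are below) =====
def Claim_equal_underscore_to_pascal_case : Prop := ∀ (pascal_case : String), Dom_underscore_to_pascal_case pascal_case → Spec_underscore_to_pascal_case pascal_case (underscore_to_pascal_case pascal_case)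

-- ===== LEMMAS AND PROOFS =====

-- structural single-char split: pvSplitU pre cs = split of (pre ++ cs) with pre underscore-free prefix
def pvSplitU (pre : List Char) : List Char → List (List Char)
  | [] => [pre]
  | c :: rest => if c = '_' then pre :: pvSplitU [] rest else pvSplitU (pre ++ [c]) rest

-- the common denotation: pvG true = "after an underscore", pvG false = "inside a word"
def pvG : Bool → List Char → List Char
  | _, [] => []
  | true, c :: cs => if c = '_' then pvG true cs else PySem.Chars.upperChar c :: pvG false cs
  | false, c :: cs => if c = '_' then pvG true cs else c :: pvG false cs

theorem pvGo_eq : ∀ (l : List Char) (fuel : Nat) (cur : List Char) (acc : List (List Char)),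
    l.length < fuel →
    PySem.Chars.splitOn.go ['_'] fuel l cur acc = acc.reverse ++ pvSplitU cur.reverse l := by
  intro l
  induction l with
  | nil =>
    intro fuel cur acc h
    match fuel, h with
    | fuel+1, _ => simp [PySem.Chars.splitOn.go, pvSplitU]
  | cons c rest ih =>
    intro fuel cur acc h
    match fuel, h with
    | fuel+1, h =>
      simp only [PySem.Chars.splitOn.go]
      by_cases hc : c = '_'
      · subst hc
        simp [List.isPrefixOf, ih fuel [] (cur.reverse :: acc) (by simpa using h), pvSplitU]
      · have hc' : ¬ ('_' = c) := fun h => hc h.symm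
        simp [List.isPrefixOf, hc, hc', ih fuel (c :: cur) acc (by simpa using h), pvSplitU]

theorem pvSplitOn_eq (cs : List Char) :
    PySem.Chars.splitOn cs ['_'] = pvSplitU [] cs := by
  simpa using pvGo_eq cs (cs.length + 1) [] [] (by omega)

theorem pvSplitU_shift (cs : List Char) : ∀ (pre : List Char),
    pvSplitU pre cs = (pre ++ (pvSplitU [] cs).headI) :: (pvSplitU [] cs).tail := by
  induction cs with
  | nil => intro pre; simp [pvSplitU]
  | cons c rest ih =>
    intro pre
    by_cases hc : c = '_'
    · simp [pvSplitU, hc]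
    · simp only [pvSplitU, if_neg hc]
      simp only [List.nil_append]
      rw [ih (pre ++ [c]), ih [c]]
      simp

theorem pvJoin_nil_cons (p : List Char) (ps : List (List Char)) :
    PySem.Chars.join [] (p :: ps) = p ++ PySem.Chars.join [] ps := by
  cases ps with
  | nil => simp [PySem.Chars.join_singleton, PySem.Chars.join_nil]
  | cons q rest => simp [PySem.Chars.join_cons_cons]

-- B's split-cap-join equals pvG, in both states
theorem pvB_eq (cs : List Char) :
    PySem.Chars.join [] ((pvSplitU [] cs).map pvCap) = pvG true cs ∧
    (pvSplitU [] cs).headI ++ PySem.Chars.join [] ((pvSplitU [] cs).tail.map pvCap) = pvG false cs := by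
  induction cs with
  | nil => simp [pvSplitU, pvG, pvCap, PySem.Chars.join_nil]
  | cons c rest ih =>
    by_cases hc : c = '_'
    · simp only [pvSplitU, hc, pvG]
      constructor
      · simpa [pvCap, pvJoin_nil_cons] using ih.1
      · simpa using ih.1
    · simp only [pvSplitU, pvG, if_neg hc, List.nil_append]
      rw [pvSplitU_shift rest [c]]
      simp only [List.map_cons, pvJoin_nil_cons, List.headI_cons, List.tail_cons]
      constructor
      · cases h : (pvSplitU [] rest).headI with
        | nil =>
          simp only [pvCap, List.cons_append, List.nil_append]
          rw [← ih.2, h]; simp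
        | cons d ds =>
          simp only [pvCap, List.cons_append]
          rw [← ih.2, h]
          simp
      · rw [← ih.2]; simp

-- A's loop equals pvG
theorem pvA_loop (cs : List Char) : ∀ (acc : List Char) (b : Bool),
    (cs.foldl pvStepA (acc, b)).1 = acc ++ pvG b cs := by
  induction cs with
  | nil => intro acc b; simp [pvG]
  | cons c rest ih =>
    intro acc b
    by_cases hc : c = '_'
    · cases b <;> simp [List.foldl_cons, pvStepA, hc, ih, pvG]
    · cases b <;> simp [List.foldl_cons, pvStepA, hc, ih, pvG]

theorem pvIslower_iff (ch : Char) : PySem.Chars.islower ch = true ↔ 97 ≤ ch.toNat ∧ ch.toNat ≤ 122 := by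
  simp only [PySem.Chars.islower, Bool.and_eq_true, decide_eq_true_eq, Char.le_def,
    UInt32.le_iff_toNat_le]
  rfl

theorem pvIslower_upperChar (c : Char) : PySem.Chars.islower (PySem.Chars.upperChar c) = false := by
  unfold PySem.Chars.upperChar
  by_cases h : PySem.Chars.islower c = true
  · rw [if_pos h]
    have hb := (pvIslower_iff c).mp h
    have hv : (c.toNat - 32).isValidChar := by
      unfold Nat.isValidChar
      omega
    have ht : (Char.ofNat (c.toNat - 32)).toNat = c.toNat - 32 := by
      rw [Char.toNat_ofNat, if_pos hv]
    rw [Bool.eq_false_iff, Ne, pvIslower_iff, ht]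
    omega
  · rw [if_neg h]
    simpa using h

-- the head of pvG true is never lowercase (so A's final fixup never fires)
theorem pvG_true_head (cs : List Char) :
    PySem.Chars.islower (pvG true cs).headI = false := by
  induction cs with
  | nil => simp [pvG, PySem.Chars.islower]
  | cons c rest ih =>
    by_cases hc : c = '_'
    · simpa [pvG, hc] using ih
    · simp [pvG, hc, pvIslower_upperChar]

-- ===== VERDICT (by name: the statement is the Claim_ definition above) =====
theorem underscore_to_pascal_case_spec : Claim_equal_underscore_to_pascal_case := by
  intro s _
  have hA := pvA_loop s.toList [] true
  simp only [List.nil_append] at hA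
  unfold Spec_underscore_to_pascal_case underscore_to_pascal_case underscore_to_pascal_case_alt
  simp only []
  rw [pvSplitOn_eq, (pvB_eq s.toList).1, hA, if_neg]
  intro ⟨_, hlow⟩
  rw [pvG_true_head s.toList] at hlow
  exact Bool.false_ne_true hlow
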